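-- pv_equiv track=rewrite | github.com/UoMResearchIT/dune-justin | modules/dashboard/utils.py | extract_rows_unique_value
-- ===== SOURCE A (Python) =====
-- from collections import defaultdict
--
-- def extract_rows_unique_value(rows: list[dict]) -> dict[str, list]:
--     if not isinstance(rows, list):
--       raise ValueError("Expected a list of dictionaries")
--     if len(rows) == 0:
--       return {}
--     if not isinstance(rows[0], dict):
--       raise ValueError("Expected a list of dictionaries")
--
--     unique_values = defaultdict(set)
--     keys = rows[0].keys()
--
--     for row in rows:
--       if not isinstance(row, dict) or set(row.keys()) != set(keys):
--         raise ValueError("All rows must be dictionaries with the same keys")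
--       for k in keys:
--         unique_values[k].add(row[k])
--
--     # avoid sorting issues with None
--     return {k: sorted([x for x in v if x is not None]) for k, v in unique_values.items()}
-- ===== SOURCE B (Python) =====
-- def extract_rows_unique_value(rows: list[dict]) -> dict[str, list]:
--     if not isinstance(rows, list):
--       raise ValueError("Expected a list of dictionaries")
--     if len(rows) == 0:
--       return {}
--     if not isinstance(rows[0], dict):
--       raise ValueError("Expected a list of dictionaries")
--
--     keys = list(rows[0].keys())
--     canon = sorted(keys)
--
--     # phase 1: validation only — a row passes iff its sorted key list is canon
--     for row in rows:
--       if not isinstance(row, dict) or sorted(row.keys()) != canon: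
--         raise ValueError("All rows must be dictionaries with the same keys")
--
--     # phase 2: per column, sort the raw values WITH duplicates, then squeeze
--     # adjacent runs; no set is ever built
--     result = {}
--     for k in keys:
--       col = sorted(row[k] for row in rows if row[k] is not None)
--       out = []
--       for x in col:
--         if not out or x != out[-1]:
--           out.append(x)
--       result[k] = out
--     return result
-- ===== Notes on version B (the rewrite author's own statement) =====
-- stated objective: alternative
-- what changed: A accumulates a defaultdict of per-key hash sets in one combined row pass and then sorts each set; B uses no set at all: it validates rows by comparing sorted key lists, then for each column sorts the raw values with duplicates and removes duplicates by squeezing adjacent equal runs of the sorted list.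
import Mathlib
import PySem

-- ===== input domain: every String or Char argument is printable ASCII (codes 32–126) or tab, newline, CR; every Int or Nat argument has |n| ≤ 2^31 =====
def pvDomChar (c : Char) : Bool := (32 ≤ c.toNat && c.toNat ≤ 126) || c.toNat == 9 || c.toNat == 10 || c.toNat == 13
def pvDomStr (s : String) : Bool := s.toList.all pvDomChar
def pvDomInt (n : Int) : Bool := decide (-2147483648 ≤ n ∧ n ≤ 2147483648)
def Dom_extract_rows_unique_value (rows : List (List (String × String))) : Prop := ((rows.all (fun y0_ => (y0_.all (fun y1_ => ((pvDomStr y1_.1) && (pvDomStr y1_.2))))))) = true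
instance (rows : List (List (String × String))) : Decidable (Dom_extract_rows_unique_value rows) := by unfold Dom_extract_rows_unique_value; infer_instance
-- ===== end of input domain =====

-- B replaces A's one-pass defaultdict-of-sets accumulation by a sorted-key-list validation pass
-- followed by per-column sort-with-duplicates and adjacent-run squeezing; no set structure exists in B
-- (objective: alternative algorithm, same practical cost).


-- ===== PORT A =====
-- row[k] (a dict lookup; under Pre_ the key is always present, so the default is never used)
def pvValA (row : List (String × String)) (k : String) : String :=
  ((PySem.Dict.mk row).get? k).getD ""

-- 'set(row.keys()) != set(keys)', negated (true = row passes the check)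
def pvCheckA (keys : List String) (row : List (String × String)) : Bool :=
  PySem.Set.equal (PySem.Set.ofList (row.map Prod.fst)) (PySem.Set.ofList keys)

-- the 'for row in rows' loop; none = the 'raise ValueError' path
def pvLoopA (keys : List String) :
    List (List (String × String)) → PySem.Dict String (PySem.Set String) →
    Option (PySem.Dict String (PySem.Set String))
  | [], uv => some uv
  | row :: rest, uv =>
    if pvCheckA keys row then
      -- for k in keys: unique_values[k].add(row[k])   (defaultdict(set) access = modify with empty default)
      pvLoopA keys rest
        (keys.foldl (fun d k => d.modify k PySem.Set.empty (fun s => PySem.Set.add s (pvValA row k))) uv)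
    else none

def extract_rows_unique_value (rows : List (List (String × String))) : List (String × List String) :=
  match rows with
  | [] => []
  | first :: _ =>
    let keys := first.map Prod.fst
    match pvLoopA keys rows PySem.Dict.empty with
    | none => []  -- A raises ValueError here; excluded by Pre_
    | some uv =>
      -- {k: sorted([x for x in v if x is not None]) for k, v in unique_values.items()};
      -- the 'x is not None' filter is vacuous here: every value is a String
      uv.items.map (fun p => (p.1, PySem.List.sorted p.2 (fun x => x) false))

-- ===== PORT B =====
def pvValB (row : List (String × String)) (k : String) : String :=
  ((PySem.Dict.mk row).get? k).getD ""

-- 'sorted(row.keys()) != canon', negated (true = row passes the check)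
def pvCheckB (canon : List String) (row : List (String × String)) : Bool :=
  PySem.List.sorted (row.map Prod.fst) (fun x => x) false == canon

-- the 'for x in col: if not out or x != out[-1]: out.append(x)' adjacent-run squeeze
def pvSqueeze (col : List String) : List String :=
  col.foldl (fun out x => if out.getLast? = some x then out else out ++ [x]) []

def extract_rows_unique_value_alt (rows : List (List (String × String))) : List (String × List String) :=
  match rows with
  | [] => []
  | first :: _ =>
    let keys := first.map Prod.fst
    let canon := PySem.List.sorted keys (fun x => x) false
    -- phase 1: validation pass (sorted key-list comparison)
    if rows.all (fun row => pvCheckB canon row) then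
      -- phase 2: per column, sort raw values with duplicates ('x is not None' is vacuous on
      -- Strings), then squeeze adjacent equal runs
      keys.map (fun k =>
        (k, pvSqueeze (PySem.List.sorted (rows.map (fun row => pvValB row k)) (fun x => x) false)))
    else []  -- B raises ValueError here; excluded by Pre_

-- ===== PRECONDITION & SPEC =====
-- Pre_ excludes (i) inputs on which A raises ValueError (some row's key set differs from the first
-- row's), and (ii) rows whose association list repeats a key: such a list does not encode a Python
-- dict (dict construction collapses duplicate keys), so A is never called on it.
def Pre_extract_rows_unique_value (rows : List (List (String × String))) : Prop :=
  ∀ r ∈ rows, (r.map Prod.fst).Nodup ∧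
    PySem.Set.equal (PySem.Set.ofList (r.map Prod.fst))
      (PySem.Set.ofList ((rows.headD []).map Prod.fst)) = true
instance (rows : List (List (String × String))) : Decidable (Pre_extract_rows_unique_value rows) := by
  unfold Pre_extract_rows_unique_value; infer_instance

def pvWitness_extract_rows_unique_value : (List (List (String × String))) :=
  [[("a", "1"), ("b", "2")], [("b", "3"), ("a", "1")]]

def Spec_extract_rows_unique_value (rows : List (List (String × String))) (out : List (String × List String)) : Prop := out = extract_rows_unique_value_alt rows
instance (rows : List (List (String × String))) (out : List (String × List String)) : Decidable (Spec_extract_rows_unique_value rows out) := by unfold Spec_extract_rows_unique_value; infer_instance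

-- ===== CLAIM (what is proved, stated in full; the proofs are below) =====
def Claim_equal_extract_rows_unique_value : Prop := ∀ (rows : List (List (String × String))), Dom_extract_rows_unique_value rows → Pre_extract_rows_unique_value rows → Spec_extract_rows_unique_value rows (extract_rows_unique_value rows)

-- ===== LEMMAS AND PROOFS =====

-- one row's inner 'for k in keys' fold, seen through getD at a key not in keys: unchanged
theorem getD_inner_notmem (keys : List String) (row : List (String × String))
    (d : PySem.Dict String (PySem.Set String)) (k : String) (hk : k ∉ keys) :
    (keys.foldl (fun d k => d.modify k PySem.Set.empty (fun s => PySem.Set.add s (pvValA row k))) d).getD k PySem.Set.empty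
      = d.getD k PySem.Set.empty := by
  induction keys generalizing d with
  | nil => rfl
  | cons a t ih =>
    simp only [List.foldl_cons]
    rw [ih _ (fun h => hk (List.mem_cons_of_mem _ h)),
        PySem.Dict.getD_modify_of_ne _ _ _ (fun h : k = a => hk (h ▸ List.mem_cons_self))]

-- one row's inner fold at a key k ∈ keys (keys nodup): exactly one value is added to k's set
theorem getD_inner (keys : List String) (row : List (String × String))
    (d : PySem.Dict String (PySem.Set String)) (k : String)
    (hnd : keys.Nodup) (hk : k ∈ keys) :
    (keys.foldl (fun d k => d.modify k PySem.Set.empty (fun s => PySem.Set.add s (pvValA row k))) d).getD k PySem.Set.empty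
      = PySem.Set.add (d.getD k PySem.Set.empty) (pvValA row k) := by
  induction keys generalizing d with
  | nil => cases hk
  | cons a t ih =>
    simp only [List.foldl_cons]
    rcases List.mem_cons.mp hk with h | h
    · subst h
      rw [getD_inner_notmem _ _ _ _ (List.nodup_cons.mp hnd).1,
          PySem.Dict.getD_modify_self]
    · have hne : k ≠ a := fun he => (List.nodup_cons.mp hnd).1 (he ▸ h)
      rw [ih _ (List.nodup_cons.mp hnd).2 h,
          PySem.Dict.getD_modify_of_ne _ _ _ hne]

-- the whole accumulation, seen through getD at k ∈ keys: a running Set.add over column k's values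
theorem getD_rows_fold (keys : List String) (rs : List (List (String × String)))
    (d : PySem.Dict String (PySem.Set String)) (k : String)
    (hnd : keys.Nodup) (hk : k ∈ keys) :
    (rs.foldl (fun d row => keys.foldl (fun d k => d.modify k PySem.Set.empty (fun s => PySem.Set.add s (pvValA row k))) d) d).getD k PySem.Set.empty
      = (rs.map (fun row => pvValA row k)).foldl PySem.Set.add (d.getD k PySem.Set.empty) := by
  induction rs generalizing d with
  | nil => rfl
  | cons r rest ih =>
    simp only [List.foldl_cons, List.map_cons]
    rw [ih _, getD_inner _ _ _ _ hnd hk]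

-- when every row passes the check, A's loop never raises and is the plain nested foldl
theorem loop_some (keys : List String) (rs : List (List (String × String)))
    (d : PySem.Dict String (PySem.Set String))
    (h : ∀ r ∈ rs, pvCheckA keys r = true) :
    pvLoopA keys rs d = some (rs.foldl (fun d row => keys.foldl (fun d k => d.modify k PySem.Set.empty (fun s => PySem.Set.add s (pvValA row k))) d) d) := by
  induction rs generalizing d with
  | nil => rfl
  | cons r rest ih =>
    simp only [pvLoopA, h r List.mem_cons_self, if_true, List.foldl_cons]
    exact ih _ (fun x hx => h x (List.mem_cons_of_mem _ hx))

theorem update_of_subset (s : PySem.Set String) (l : List String) (h : ∀ x ∈ l, x ∈ s) :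
    PySem.Set.update s l = s := by
  induction l generalizing s with
  | nil => rfl
  | cons a t ih =>
    show PySem.Set.update (PySem.Set.add s a) t = s
    rw [PySem.Set.add_of_mem (h a List.mem_cons_self)]
    exact ih _ (fun x hx => h x (List.mem_cons_of_mem _ hx))

-- once the dict already carries exactly 'keys', further rows never change its key list
theorem keys_rows_fold (keys : List String) (rs : List (List (String × String)))
    (d : PySem.Dict String (PySem.Set String)) (hd : d.keys = keys) :
    (rs.foldl (fun d row => keys.foldl (fun d k => d.modify k PySem.Set.empty (fun s => PySem.Set.add s (pvValA row k))) d) d).keys = keys := by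
  induction rs generalizing d with
  | nil => exact hd
  | cons r rest ih =>
    simp only [List.foldl_cons]
    apply ih
    rw [PySem.Dict.keys_foldl_modify keys PySem.Set.empty (fun d x => (fun s => PySem.Set.add s (pvValA r x))), hd,
        update_of_subset _ _ (fun x hx => hx)]

-- membership through B's squeeze loop (any accumulator): the fold collects acc ∪ col
theorem mem_squeeze_foldl (col acc : List String) (a : String) :
    a ∈ col.foldl (fun out x => if out.getLast? = some x then out else out ++ [x]) acc
      ↔ a ∈ acc ∨ a ∈ col := by
  induction col generalizing acc with
  | nil => simp
  | cons x rest ih =>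
    simp only [List.foldl_cons]
    by_cases h : acc.getLast? = some x
    · rw [if_pos h, ih]
      constructor
      · rintro (ha | ha)
        · exact Or.inl ha
        · exact Or.inr (List.mem_cons_of_mem _ ha)
      · rintro (ha | ha)
        · exact Or.inl ha
        · rcases List.mem_cons.mp ha with rfl | ha
          · exact Or.inl (List.mem_of_getLast? h)
          · exact Or.inr ha
    · rw [if_neg h, ih]
      simp only [List.mem_append, List.mem_cons]
      tauto
-- in a ≤-pairwise list the last element bounds every member
theorem le_of_getLast?_pairwise (acc : List String) (hp : acc.Pairwise (· ≤ ·))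
    (a b : String) (ha : a ∈ acc) (hgl : acc.getLast? = some b) : a ≤ b := by
  induction acc with
  | nil => cases ha
  | cons c t ih =>
    cases t with
    | nil =>
      rcases List.mem_singleton.mp ha with rfl
      cases Option.some.inj hgl
      exact le_refl a
    | cons d u =>
      rw [List.getLast?_cons_cons] at hgl
      rcases List.mem_cons.mp ha with rfl | ha
      · exact (List.pairwise_cons.mp hp).1 b (List.mem_of_getLast? hgl)
      · exact ih (List.pairwise_cons.mp hp).2 ha hgl

-- strict sortedness through B's squeeze loop, given a ≤-pairwise input column
theorem pairwise_squeeze_foldl (col acc : List String)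
    (hacc : acc.Pairwise (· < ·))
    (hcol : col.Pairwise (· ≤ ·))
    (hb : ∀ a ∈ acc, ∀ x ∈ col, a ≤ x) :
    (col.foldl (fun out x => if out.getLast? = some x then out else out ++ [x]) acc).Pairwise (· < ·) := by
  induction col generalizing acc with
  | nil => exact hacc
  | cons x rest ih =>
    simp only [List.foldl_cons]
    have hrest : rest.Pairwise (· ≤ ·) := (List.pairwise_cons.mp hcol).2
    by_cases h : acc.getLast? = some x
    · rw [if_pos h]
      exact ih acc hacc hrest
        (fun a ha y hy => hb a ha y (List.mem_cons_of_mem _ hy))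
    · rw [if_neg h]
      refine ih _ ?_ hrest ?_
      · -- acc ++ [x] is strictly sorted: each a ∈ acc has a ≤ x and a ≠ last implies a < x
        rw [List.pairwise_append]
        refine ⟨hacc, List.pairwise_singleton _ _, ?_⟩
        intro a ha y hy
        rcases List.mem_singleton.mp hy with rfl
        have hle : a ≤ y := hb a ha y List.mem_cons_self
        rcases lt_or_eq_of_le hle with hlt | rfl
        · exact hlt
        · -- a = x: then x is already the last element of acc, contradicting the guard
          exfalso
          have hne : acc ≠ [] := List.ne_nil_of_mem ha
          cases hgl : acc.getLast? with
          | none => exact hne (List.getLast?_eq_none_iff.mp hgl)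
          | some b =>
            have h1 : b ≤ a := hb b (List.mem_of_getLast? hgl) a List.mem_cons_self
            have h2 : a ≤ b := le_of_getLast?_pairwise acc (hacc.imp le_of_lt) a b ha hgl
            exact h (by rw [hgl, le_antisymm h2 h1])
      · intro a ha y hy
        rcases List.mem_append.mp ha with ha | ha
        · exact hb a ha y (List.mem_cons_of_mem _ hy)
        · rcases List.mem_singleton.mp ha with rfl
          exact (List.pairwise_cons.mp hcol).1 y hy

-- B's sort-then-squeeze of a column equals A's sort of its set of values
theorem squeeze_eq_sorted_ofList (col : List String) :
    PySem.List.sorted (PySem.Set.ofList col) (fun x => x) false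
      = pvSqueeze (PySem.List.sorted col (fun x => x) false) := by
  apply PySem.List.sorted_eq_of_perm_of_pairwise_lt
  · -- permutation: both sides are Nodup with the same members
    have hnd1 : (pvSqueeze (PySem.List.sorted col (fun x => x) false)).Pairwise (· < ·) :=
      pairwise_squeeze_foldl _ [] (List.Pairwise.nil)
        (by simpa using PySem.List.sorted_pairwise col (fun x => x)) (by simp)
    refine (List.perm_ext_iff_of_nodup (hnd1.imp ne_of_lt) (PySem.Set.nodup_ofList col)).mpr ?_
    intro a
    rw [PySem.Set.mem_ofList]
    unfold pvSqueeze
    rw [mem_squeeze_foldl, PySem.List.mem_sorted]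
    simp
  · exact pairwise_squeeze_foldl _ [] (List.Pairwise.nil)
      (by simpa using PySem.List.sorted_pairwise col (fun x => x)) (by simp)

-- under Pre_ every row also passes B's sorted-key-list check
theorem checkB_of_pre (first r : List (String × String))
    (hnd : (first.map Prod.fst).Nodup)
    (hndr : (r.map Prod.fst).Nodup)
    (heq : PySem.Set.equal (PySem.Set.ofList (r.map Prod.fst))
      (PySem.Set.ofList (first.map Prod.fst)) = true) :
    pvCheckB (PySem.List.sorted (first.map Prod.fst) (fun x => x) false) r = true := by
  unfold pvCheckB
  rw [beq_iff_eq]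
  apply PySem.List.sorted_eq_sorted_of_perm _ _ _ (fun a b h => h)
  apply (List.perm_ext_iff_of_nodup hndr hnd).mpr
  intro a
  have := (PySem.Set.equal_iff _ _).mp heq a
  rw [PySem.Set.mem_ofList, PySem.Set.mem_ofList] at this
  exact this

theorem extract_rows_unique_value_main (rows : List (List (String × String)))
    (hpre : Pre_extract_rows_unique_value rows) :
    extract_rows_unique_value rows = extract_rows_unique_value_alt rows := by
  cases rows with
  | nil => rfl
  | cons first rest =>
    have hnd : (first.map Prod.fst).Nodup := (hpre first List.mem_cons_self).1
    have hchk : ∀ r ∈ first :: rest, pvCheckA (first.map Prod.fst) r = true :=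
      fun r hr => (hpre r hr).2
    have hall : (first :: rest).all
        (fun row => pvCheckB (PySem.List.sorted (first.map Prod.fst) (fun x => x) false) row) = true :=
      List.all_eq_true.mpr (fun r hr =>
        checkB_of_pre first r hnd (hpre r hr).1 (hpre r hr).2)
    have hkeysF :
        ((first :: rest).foldl (fun d row => (first.map Prod.fst).foldl (fun d k => d.modify k PySem.Set.empty (fun s => PySem.Set.add s (pvValA row k))) d) PySem.Dict.empty).keys
          = first.map Prod.fst := by
      simp only [List.foldl_cons]
      apply keys_rows_fold
      rw [PySem.Dict.keys_foldl_modify (first.map Prod.fst) PySem.Set.empty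
            (fun d x => (fun s => PySem.Set.add s (pvValA first x)))]
      show PySem.Set.update PySem.Dict.empty.keys (first.map Prod.fst) = _
      rw [PySem.Dict.keys_empty]
      show List.foldl PySem.Set.add [] (first.map Prod.fst) = _
      rw [← PySem.Set.ofList_eq_foldl, PySem.Set.ofList_eq_self_of_nodup _ hnd]
    simp only [extract_rows_unique_value, extract_rows_unique_value_alt,
      loop_some _ _ _ hchk, hall, if_true]
    rw [PySem.Dict.items_eq_map_keys _ (by rw [hkeysF]; exact hnd) PySem.Set.empty, hkeysF, List.map_map]
    apply List.map_congr_left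
    intro k hk
    simp only [Function.comp_apply]
    rw [getD_rows_fold _ _ _ _ hnd hk, PySem.Dict.getD_empty]
    show (k, PySem.List.sorted (List.foldl PySem.Set.add [] _) _ _) = _
    rw [← PySem.Set.ofList_eq_foldl, squeeze_eq_sorted_ofList]
    rfl

-- ===== VERDICT (by name: the statement is the Claim_ definition above) =====
theorem extract_rows_unique_value_spec : Claim_equal_extract_rows_unique_value := by
  intro rows _ hpre
  exact extract_rows_unique_value_main rows hpre
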